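-- pv_equiv track=rewrite | github.com/JasonX1128/hookemhacks | backend/app/services/catalyst_synthesis.py | _has_unterminated_string
-- ===== SOURCE A (Python) =====
-- def _has_unterminated_string(value: str) -> bool:
--     in_string = False
--     escaped = False
--     for char in value:
--         if in_string:
--             if escaped:
--                 escaped = False
--             elif char == "\\":
--                 escaped = True
--             elif char == '"':
--                 in_string = False
--         elif char == '"':
--             in_string = True
--     return in_string
-- ===== SOURCE B (Python) =====
-- def _has_unterminated_string(value: str) -> bool:
--     n = len(value)
--     i = 0
--     while i < n:
--         if value[i] == '"':
--             i += 1
--             closed = False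
--             while i < n:
--                 c = value[i]
--                 if c == '\\':
--                     i += 2
--                 elif c == '"':
--                     closed = True
--                     i += 1
--                     break
--                 else:
--                     i += 1
--             if not closed:
--                 return True
--         else:
--             i += 1
--     return False
-- ===== Notes on version B (the rewrite author's own statement) =====
-- stated objective: alternative
-- what changed: Replaced A's single pass with boolean in_string/escaped flags by a two-level index scan: an outer loop looks for an opening quote, an inner loop consumes the string body (jumping two positions on a backslash) and reports immediately if the input ends before a closing quote.
import Mathlib
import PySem

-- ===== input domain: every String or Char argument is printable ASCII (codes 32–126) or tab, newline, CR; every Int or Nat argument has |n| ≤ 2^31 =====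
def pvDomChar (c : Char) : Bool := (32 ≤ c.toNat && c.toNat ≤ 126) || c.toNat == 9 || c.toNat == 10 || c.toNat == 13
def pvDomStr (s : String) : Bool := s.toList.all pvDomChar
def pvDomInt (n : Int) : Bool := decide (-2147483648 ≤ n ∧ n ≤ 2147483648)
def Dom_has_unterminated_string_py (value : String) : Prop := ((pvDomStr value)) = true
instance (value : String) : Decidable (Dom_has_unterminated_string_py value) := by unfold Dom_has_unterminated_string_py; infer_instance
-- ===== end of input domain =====

-- B replaces A's boolean-flag state machine by a two-level scan (outer loop looking for an
-- opening quote, inner loop consuming the string body, skipping two chars on a backslash);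
-- objective: alternative decomposition, same O(n) cost.

-- ===== PORT A =====
-- A's for-loop body: state (in_string, escaped), one step per character.
def pvStepA (s : Bool × Bool) (c : Char) : Bool × Bool :=
  if s.1 then
    if s.2 then (s.1, false)
    else if c = '\\' then (s.1, true)
    else if c = '"' then (false, s.2)
    else s
  else if c = '"' then (true, s.2)
  else s

def has_unterminated_string_py (value : String) : Bool :=
  (value.toList.foldl pvStepA (false, false)).1

-- ===== PORT B =====
-- inner while loop of Source B, on the tail of the input after the opening quote: `none` =
-- the input ends before a closing quote (including the i += 2 overshoot on a trailing
-- backslash), `some rest` = the input remaining after the closing quote.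
def pvScanIn : List Char → Option (List Char)
  | [] => none
  | c :: rest =>
    if c = '\\' then
      match rest with
      | [] => none            -- i += 2 overshoots the end
      | _ :: rest' => pvScanIn rest'
    else if c = '"' then some rest
    else pvScanIn rest

-- unfold equations and length bound for pvScanIn: the port pvScanOut needs the bound
-- for its termination argument, so these three stay above it.
theorem pvScanIn_nil : pvScanIn [] = none := by simp [pvScanIn]

theorem pvScanIn_cons (c : Char) (rest : List Char) : pvScanIn (c :: rest) =
    (if c = '\\' then (match rest with | [] => none | _ :: rest' => pvScanIn rest')
     else if c = '"' then some rest else pvScanIn rest) := by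
  rw [pvScanIn.eq_def]

theorem pvScanIn_length : ∀ (n : Nat) (l r : List Char),
    l.length ≤ n → pvScanIn l = some r → r.length < l.length := by
  intro n
  induction n with
  | zero =>
    intro l r hl h
    have : l = [] := List.eq_nil_of_length_eq_zero (Nat.le_zero.mp hl)
    subst this; rw [pvScanIn_nil] at h; exact absurd h (by simp)
  | succ n ih =>
    intro l r hl h
    cases l with
    | nil => rw [pvScanIn_nil] at h; exact absurd h (by simp)
    | cons c rest =>
      rw [pvScanIn_cons] at h
      by_cases hb : c = '\\'
      · rw [if_pos hb] at h
        cases rest with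
        | nil => exact absurd h (by simp)
        | cons d rest' =>
          simp only [] at h
          have hr : rest'.length ≤ n := by simp at hl; omega
          have := ih rest' r hr h
          simp; omega
      · rw [if_neg hb] at h
        by_cases hq : c = '"'
        · rw [if_pos hq] at h
          have : r = rest := by simpa using h.symm
          subst this; simp
        · rw [if_neg hq] at h
          have hr : rest.length ≤ n := by simp at hl; omega
          have := ih rest r hr h
          simp; omega

-- outer while loop of Source B: scan for an opening quote.
def pvScanOut : List Char → Bool
  | [] => false
  | c :: rest =>
    if c = '"' then
      match h : pvScanIn rest with
      | none => true
      | some r => pvScanOut r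
    else pvScanOut rest
termination_by l => l.length
decreasing_by
  · exact Nat.lt_succ_of_lt (pvScanIn_length rest.length rest r (le_refl _) h)
  · simp

def has_unterminated_string_py_alt (value : String) : Bool :=
  pvScanOut value.toList

-- ===== PRECONDITION & SPEC =====
def Spec_has_unterminated_string_py (value : String) (out : Bool) : Prop := out = has_unterminated_string_py_alt value
instance (value : String) (out : Bool) : Decidable (Spec_has_unterminated_string_py value out) := by unfold Spec_has_unterminated_string_py; infer_instance

-- ===== CLAIM (what is proved, stated in full; the proofs are below) =====
def Claim_equal_has_unterminated_string_py : Prop := ∀ (value : String), Dom_has_unterminated_string_py value → Spec_has_unterminated_string_py value (has_unterminated_string_py value)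

-- ===== LEMMAS AND PROOFS =====

theorem pvScanOut_nil : pvScanOut [] = false := by rw [pvScanOut.eq_def]

theorem pvScanOut_cons (c : Char) (rest : List Char) : pvScanOut (c :: rest) =
    (if c = '"' then (match pvScanIn rest with | none => true | some r => pvScanOut r)
     else pvScanOut rest) := by
  rw [pvScanOut.eq_def]
  by_cases hq : c = '"'
  · simp only [if_pos hq]
    rcases hp : pvScanIn rest with _ | r <;> simp
  · simp only [if_neg hq]

-- Joint invariant, by strong induction on length:
-- from state (false,false) A's fold computes B's outer scan pvScanOut;
-- from state (true,false) it computes the disposition of B's inner scan pvScanIn.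
theorem pvFold_inv : ∀ (n : Nat) (l : List Char), l.length ≤ n →
    ((l.foldl pvStepA (false, false)).1 = pvScanOut l ∧
     (l.foldl pvStepA (true, false)).1 =
       (match pvScanIn l with
        | none => true
        | some r => pvScanOut r)) := by
  intro n
  induction n with
  | zero =>
    intro l hl
    have : l = [] := List.eq_nil_of_length_eq_zero (Nat.le_zero.mp hl)
    subst this
    simp [pvScanOut_nil, pvScanIn_nil]
  | succ n ih =>
    intro l hl
    cases l with
    | nil => simp [pvScanOut_nil, pvScanIn_nil]
    | cons c rest =>
      have hrest : rest.length ≤ n := by simp at hl; omega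
      constructor
      · -- outer: state (false,false)
        rw [List.foldl_cons, pvScanOut_cons]
        by_cases hq : c = '"'
        · have h1 : pvStepA (false, false) c = (true, false) := by simp [pvStepA, hq]
          rw [h1, if_pos hq]
          exact (ih rest hrest).2
        · have h1 : pvStepA (false, false) c = (false, false) := by simp [pvStepA, hq]
          rw [h1, if_neg hq]
          exact (ih rest hrest).1
      · -- inner: state (true,false)
        rw [List.foldl_cons, pvScanIn_cons]
        by_cases hb : c = '\\'
        · have h1 : pvStepA (true, false) c = (true, true) := by simp [pvStepA, hb]
          rw [h1, if_pos hb]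
          cases rest with
          | nil => simp
          | cons d rest' =>
            have h2 : pvStepA (true, true) d = (true, false) := by simp [pvStepA]
            rw [List.foldl_cons, h2]
            have hr' : rest'.length ≤ n := by simp at hrest; omega
            exact (ih rest' hr').2
        · rw [if_neg hb]
          by_cases hq : c = '"'
          · have h1 : pvStepA (true, false) c = (false, false) := by simp [pvStepA, hq]
            rw [h1, if_pos hq]
            exact (ih rest hrest).1
          · have h1 : pvStepA (true, false) c = (true, false) := by simp [pvStepA, hb, hq]
            rw [h1, if_neg hq]
            exact (ih rest hrest).2

-- ===== VERDICT (by name: the statement is the Claim_ definition above) =====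
theorem has_unterminated_string_py_spec : Claim_equal_has_unterminated_string_py := by
  intro value _
  unfold Spec_has_unterminated_string_py has_unterminated_string_py has_unterminated_string_py_alt
  exact (pvFold_inv value.toList.length value.toList (le_refl _)).1
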